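-- pv_equiv track=rewrite | github.com/prashant-rathod/GAT | tzasacky_NLP/nlp_runner.py | csvInfo
-- ===== SOURCE A (Python) =====
-- def csvInfo(entityUsages):
--     labels = {}
--     for key in entityUsages.keys():
--         for label in entityUsages[key]:
--             if label in labels:
--                 if len(entityUsages[key][label]) > labels[label]:
--                     labels[label] = len(entityUsages[key][label])
--             else: labels[label] = len(entityUsages[key][label])
--     return labels
-- ===== SOURCE B (Python) =====
-- from collections import defaultdict
--
-- def csvInfo(entityUsages):
--     groups = defaultdict(list)
--     for key in entityUsages:
--         for label, usages in entityUsages[key].items():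
--             groups[label].append(len(usages))
--     return {label: max(lengths) for label, lengths in groups.items()}
-- ===== Notes on version B (the rewrite author's own statement) =====
-- stated objective: alternative
-- what changed: A keeps a running maximum per label with an inline membership/branch update; B first builds a complete label -> list-of-lengths table (defaultdict) in one grouping phase and then reduces each group to its max in a separate dict comprehension.
import Mathlib
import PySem

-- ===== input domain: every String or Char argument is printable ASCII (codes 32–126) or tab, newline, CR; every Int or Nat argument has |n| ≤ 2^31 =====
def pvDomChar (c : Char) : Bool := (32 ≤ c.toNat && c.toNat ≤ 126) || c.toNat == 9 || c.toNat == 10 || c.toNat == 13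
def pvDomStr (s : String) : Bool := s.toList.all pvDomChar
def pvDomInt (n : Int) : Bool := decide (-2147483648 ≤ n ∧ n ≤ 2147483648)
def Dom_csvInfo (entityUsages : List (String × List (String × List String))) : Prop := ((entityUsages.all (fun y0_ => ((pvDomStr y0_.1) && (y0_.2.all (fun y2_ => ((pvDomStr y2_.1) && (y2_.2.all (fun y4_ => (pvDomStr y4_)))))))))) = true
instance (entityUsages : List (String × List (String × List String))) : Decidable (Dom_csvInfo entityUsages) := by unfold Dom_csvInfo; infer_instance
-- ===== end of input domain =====

-- B replaces A's inline running-max branch by a two-phase build-a-table-then-reduce decomposition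
-- (collect every per-label usage-list length into a grouping dict, then take each group's max);
-- objective: alternative decomposition, same cost.

-- Shared input decoding: the Python argument is a dict of dicts; the assoc-list argument is read
-- as Python's dict literal reads it (duplicate keys: last value wins, first position kept).
def pvAsDict (entityUsages : List (String × List (String × List String))) :
    PySem.Dict String (PySem.Dict String (List String)) :=
  PySem.Dict.ofList (entityUsages.map (fun p => (p.1, PySem.Dict.ofList p.2)))

-- ===== PORT A =====
-- for key in d.keys(): for label in d[key]: running-max insert into `labels`
def csvInfo (entityUsages : List (String × List (String × List String))) : List (String × Int) :=
  let d := pvAsDict entityUsages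
  (d.keys.foldl (fun labels key =>
      (d.getD key PySem.Dict.empty).keys.foldl (fun labels label =>
        let n : Int := ((d.getD key PySem.Dict.empty).getD label []).length
        if labels.contains label then
          if n > labels.getD label 0 then labels.insert label n else labels
        else labels.insert label n) labels)
    (PySem.Dict.empty : PySem.Dict String Int)).items

-- ===== PORT B =====
-- phase 1: group every len(usages) under its label; phase 2: map each group to its max
def csvInfo_alt (entityUsages : List (String × List (String × List String))) : List (String × Int) :=
  let d := pvAsDict entityUsages
  let groups : PySem.Dict String (List Int) :=
    d.items.foldl (fun g p =>
      p.2.items.foldl (fun g q => g.modify q.1 [] (· ++ [(q.2.length : Int)])) g)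
      PySem.Dict.empty
  groups.items.map (fun p => (p.1, (PySem.List.max? p.2 id).getD 0))

-- ===== PRECONDITION & SPEC =====
def Spec_csvInfo (entityUsages : List (String × List (String × List String))) (out : List (String × Int)) : Prop := out = csvInfo_alt entityUsages
instance (entityUsages : List (String × List (String × List String))) (out : List (String × Int)) : Decidable (Spec_csvInfo entityUsages out) := by unfold Spec_csvInfo; infer_instance

-- ===== CLAIM (what is proved, stated in full; the proofs are below) =====
def Claim_equal_csvInfo : Prop := ∀ (entityUsages : List (String × List (String × List String))), Dom_csvInfo entityUsages → Spec_csvInfo entityUsages (csvInfo entityUsages)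


-- ===== LEMMAS AND PROOFS =====

-- A's running-max step and B's grouping step, on the flattened (label, length) pairs
def pvStepA (labels : PySem.Dict String Int) (q : String × Int) : PySem.Dict String Int :=
  if labels.contains q.1 then
    if q.2 > labels.getD q.1 0 then labels.insert q.1 q.2 else labels
  else labels.insert q.1 q.2

def pvStepB (g : PySem.Dict String (List Int)) (q : String × Int) : PySem.Dict String (List Int) :=
  g.modify q.1 [] (· ++ [q.2])

def pvReduce (g : PySem.Dict String (List Int)) : PySem.Dict String Int :=
  PySem.Dict.mk (g.items.map (fun p => (p.1, (PySem.List.max? p.2 id).getD 0)))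

-- the pairs both ports effectively traverse
def pvPairs (d : PySem.Dict String (PySem.Dict String (List String))) : List (String × Int) :=
  d.items.flatMap (fun p => p.2.items.map (fun q => (q.1, (q.2.length : Int))))

theorem pvMemValuesUpdate {κ ν : Type} [BEq κ] [LawfulBEq κ] (l : List (κ × ν)) (d : PySem.Dict κ ν)
    (v : ν) : v ∈ (d.update l).values → v ∈ d.values ∨ v ∈ l.map (·.2) := by
  induction l generalizing d with
  | nil => exact fun hv => Or.inl hv
  | cons h t ih =>
    intro hv
    rcases ih (d.insert h.1 h.2) hv with h1 | h2
    · rcases PySem.Dict.mem_values_insert _ _ _ _ h1 with rfl | h3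
      · exact Or.inr (by simp)
      · exact Or.inl h3
    · exact Or.inr (by simp [h2])

theorem pvInnerNodup (eu : List (String × List (String × List String)))
    (p : String × PySem.Dict String (List String)) (hp : p ∈ (pvAsDict eu).items) :
    p.2.keys.Nodup := by
  have hv : p.2 ∈ (pvAsDict eu).values := List.mem_map_of_mem hp
  rcases pvMemValuesUpdate _ _ _ hv with h1 | h2
  · simp [PySem.Dict.values, PySem.Dict.empty] at h1
  · simp only [List.map_map, List.mem_map] at h2
    obtain ⟨r, _, hr⟩ := h2
    rw [← hr]
    exact PySem.Dict.nodup_keys_ofList _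

theorem pvReduceContains (g : PySem.Dict String (List Int)) (l : String) :
    (pvReduce g).contains l = g.contains l := by
  simp [pvReduce, PySem.Dict.contains, List.any_map, Function.comp_def]

theorem pvReduceKeys (g : PySem.Dict String (List Int)) : (pvReduce g).keys = g.keys := by
  simp [pvReduce, PySem.Dict.keys, List.map_map, Function.comp_def]

theorem pvMaxSome (x : Int) (t : List Int) : ∃ m, PySem.List.max? (x :: t) id = some m := by
  induction t generalizing x with
  | nil => exact ⟨x, rfl⟩
  | cons y ys ih =>
    have hstep : PySem.List.max? (x :: y :: ys) id = PySem.List.max? ((if x < y then y else x) :: ys) id := by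
      simp only [PySem.List.max?, List.foldl_cons, id_eq]
      by_cases h : x < y <;> simp [h]
    rw [hstep]; exact ih _

theorem pvMaxAppend (xs : List Int) (n m : Int) (h : PySem.List.max? xs id = some m) :
    (PySem.List.max? (xs ++ [n]) id).getD 0 = if m < n then n else m := by
  simp only [PySem.List.max?, id] at h ⊢
  rw [List.foldl_append, h]
  by_cases hmn : m < n <;> simp [hmn]

theorem pvStep_eq (g : PySem.Dict String (List Int)) (hnd : g.keys.Nodup)
    (hne : ∀ v ∈ g.values, v ≠ []) (q : String × Int) :
    pvStepA (pvReduce g) q = pvReduce (pvStepB g q) := by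
  obtain ⟨l, n⟩ := q
  by_cases hc : g.contains l = true
  · -- l already grouped: A compares with the running max, B appends to the group
    obtain ⟨xs, hxs⟩ : ∃ xs, g.get? l = some xs := by
      have := PySem.Dict.contains_eq_isSome_get? g l
      rw [hc] at this
      exact Option.isSome_iff_exists.mp this.symm
    have hmem : (l, xs) ∈ g.items := (PySem.Dict.get?_eq_some_iff_mem_items g l xs hnd).mp hxs
    have hxsne : xs ≠ [] := hne xs (List.mem_map_of_mem hmem)
    obtain ⟨m, hm⟩ : ∃ m, PySem.List.max? xs id = some m := by
      cases xs with
      | nil => exact absurd rfl hxsne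
      | cons a t => exact pvMaxSome a t
    have hB : pvStepB g (l, n) = g.insert l (xs ++ [n]) := by
      simp [pvStepB, PySem.Dict.modify, PySem.Dict.getD, hxs]
    have hcr : (pvReduce g).contains l = true := by rw [pvReduceContains]; exact hc
    have hrnd : (pvReduce g).keys.Nodup := by rw [pvReduceKeys]; exact hnd
    have hrm : ((l, m) : String × Int) ∈ (pvReduce g).items := by
      have := List.mem_map_of_mem (f := fun p => (p.1, (PySem.List.max? p.2 id).getD 0)) hmem
      simpa [pvReduce, hm] using this
    have hgetD : (pvReduce g).getD l 0 = m := PySem.Dict.getD_of_mem_items _ hrm hrnd 0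
    rw [hB]
    simp only [pvStepA, hcr, if_true, hgetD, gt_iff_lt]
    apply PySem.Dict.ext
    have hM := pvMaxAppend xs n m hm
    by_cases hmn : m < n
    · rw [if_pos hmn]
      rw [PySem.Dict.items_insert_of_contains _ _ hcr]
      simp only [pvReduce, PySem.Dict.items_insert_of_contains _ _ hc, List.map_map]
      apply List.map_congr_left
      intro p _
      by_cases hpl : p.1 = l <;> simp [hpl, hM, hmn]
    · rw [if_neg hmn]
      simp only [pvReduce, PySem.Dict.items_insert_of_contains _ _ hc, List.map_map]
      apply List.map_congr_left
      intro p hp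
      by_cases hpl : p.1 = l
      · have hp2 : p.2 = xs := by
          have := PySem.Dict.get?_of_mem_items g (show (p.1, p.2) ∈ g.items from hp) hnd
          rw [hpl, hxs] at this
          exact (Option.some_inj.mp this).symm
        simp [hpl, hM, hmn, hp2, hm]
      · simp [hpl]
  · -- fresh label: both sides append a new entry
    have hc' : g.contains l = false := by simpa using hc
    have hB : pvStepB g (l, n) = g.insert l [n] := by
      simp [pvStepB, PySem.Dict.modify, PySem.Dict.getD_of_not_contains g [] hc']
    have hcr : (pvReduce g).contains l = false := by rw [pvReduceContains]; exact hc'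
    rw [hB]
    simp only [pvStepA, hcr, Bool.false_eq_true, if_false]
    apply PySem.Dict.ext
    rw [PySem.Dict.items_insert_of_not_contains _ _ hcr]
    simp [pvReduce, PySem.Dict.items_insert_of_not_contains _ _ hc', PySem.List.max?]

theorem pvStepB_nodup (g : PySem.Dict String (List Int)) (hnd : g.keys.Nodup) (q : String × Int) :
    (pvStepB g q).keys.Nodup := by
  unfold pvStepB PySem.Dict.modify
  by_cases hc : g.contains q.1 = true
  · rw [PySem.Dict.keys_insert_of_contains _ _ hc]; exact hnd
  · rw [PySem.Dict.keys_insert_of_not_contains _ _ (by simpa using hc)]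
    simp only [List.nodup_append, List.nodup_cons]
    refine ⟨hnd, by simp, ?_⟩
    intro x hx b hb
    simp only [List.mem_singleton] at hb
    subst hb
    rintro rfl
    exact absurd ((PySem.Dict.contains_iff_mem_keys g q.1).mpr hx) (by simpa using hc)

theorem pvStepB_ne_nil (g : PySem.Dict String (List Int)) (hne : ∀ v ∈ g.values, v ≠ [])
    (q : String × Int) : ∀ v ∈ (pvStepB g q).values, v ≠ [] := by
  intro v hv
  rcases PySem.Dict.mem_values_insert _ _ _ _ hv with rfl | h2
  · simp
  · exact hne v h2

theorem pvMain (ps : List (String × Int)) (g : PySem.Dict String (List Int))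
    (hnd : g.keys.Nodup) (hne : ∀ v ∈ g.values, v ≠ []) :
    ps.foldl pvStepA (pvReduce g) = pvReduce (ps.foldl pvStepB g) := by
  induction ps generalizing g with
  | nil => rfl
  | cons q t ih =>
    simp only [List.foldl_cons]
    rw [pvStep_eq g hnd hne q]
    exact ih _ (pvStepB_nodup g hnd q) (pvStepB_ne_nil g hne q)

theorem pvPortA (eu : List (String × List (String × List String))) :
    csvInfo eu = ((pvPairs (pvAsDict eu)).foldl pvStepA PySem.Dict.empty).items := by
  have hnd : (pvAsDict eu).keys.Nodup := PySem.Dict.nodup_keys_ofList _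
  simp only [csvInfo, pvPairs, PySem.Dict.keys, List.foldl_flatMap, List.foldl_map]
  congr 1
  apply PySem.List.foldl_congr_mem
  intro acc p hp
  rw [PySem.Dict.getD_of_mem_items _ (show (p.1, p.2) ∈ _ from hp) hnd]
  apply PySem.List.foldl_congr_mem
  intro acc2 q hq
  rw [PySem.Dict.getD_of_mem_items _ (show (q.1, q.2) ∈ _ from hq) (pvInnerNodup eu p hp)]
  rfl

theorem pvPortB (eu : List (String × List (String × List String))) :
    csvInfo_alt eu = (pvReduce ((pvPairs (pvAsDict eu)).foldl pvStepB PySem.Dict.empty)).items := by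
  simp only [csvInfo_alt, pvPairs, pvReduce, pvStepB, List.foldl_flatMap, List.foldl_map]

-- ===== VERDICT (by name: the statement is the Claim_ definition above) =====
theorem csvInfo_spec : Claim_equal_csvInfo := by
  intro eu _
  unfold Spec_csvInfo
  rw [pvPortA, pvPortB, ← pvMain _ _ (by simp [PySem.Dict.keys, PySem.Dict.empty])
    (by intro v hv; simp [PySem.Dict.values, PySem.Dict.empty] at hv)]
  rfl
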